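-- pv_equiv track=rewrite | github.com/DarthCadeus/SemanticExtractor | NLPExtension.py | punctuation_partition
-- ===== SOURCE A (Python) =====
-- def punctuation_partition(tokens, just_words=False):
--     part = []
--     if type(tokens[0]) is tuple:
--         for t in tokens:
--             if t[0] == ",":
--                 yield part
--                 part = []
--             else:
--                 part.append(t if just_words else t[0])
--         yield part
--     else:
--         for t in tokens:
--             if t == ",":
--                 yield part
--                 part = []
--             else:
--                 part.append(t)
--         yield part
-- ===== SOURCE B (Python) =====
-- def punctuation_partition(tokens, just_words=False):
--     # Boundary-based partition: collect comma indices once, then emit the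
--     # slices strictly between consecutive boundaries.
--     if type(tokens[0]) is tuple:
--         is_comma = lambda t: t[0] == ","
--         val = (lambda t: t) if just_words else (lambda t: t[0])
--     else:
--         is_comma = lambda t: t == ","
--         val = lambda t: t
--     idxs = [i for i, t in enumerate(tokens) if is_comma(t)]
--     bounds = [-1] + idxs + [len(tokens)]
--     for lo, hi in zip(bounds, bounds[1:]):
--         yield [val(t) for t in tokens[lo + 1:hi]]
-- ===== Notes on version B (the rewrite author's own statement) =====
-- stated objective: alternative
-- what changed: B replaces A's single-pass accumulator (append to a growing part, flush on comma) by a boundary decomposition: it collects the comma indices once and then yields the slice of tokens strictly between each pair of consecutive boundaries [-1]+idxs+[len(tokens)].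
-- outside the precondition, e.g. on punctuation_partition([], False): A raises IndexError, B raises IndexError
import Mathlib
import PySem

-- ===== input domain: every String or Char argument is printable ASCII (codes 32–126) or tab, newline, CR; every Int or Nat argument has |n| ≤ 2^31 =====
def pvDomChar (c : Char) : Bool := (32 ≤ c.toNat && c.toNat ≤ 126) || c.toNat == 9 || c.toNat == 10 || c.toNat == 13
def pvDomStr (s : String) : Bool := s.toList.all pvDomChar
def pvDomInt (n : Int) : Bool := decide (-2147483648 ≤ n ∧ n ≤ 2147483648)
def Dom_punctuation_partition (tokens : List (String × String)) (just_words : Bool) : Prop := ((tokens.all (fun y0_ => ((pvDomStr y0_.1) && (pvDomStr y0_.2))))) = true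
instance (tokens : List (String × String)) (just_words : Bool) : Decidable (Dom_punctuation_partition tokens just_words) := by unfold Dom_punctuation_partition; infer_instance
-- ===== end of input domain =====

-- B partitions by collecting the comma indices once and slicing between consecutive
-- boundaries, instead of A's single-pass flush-on-comma accumulator (objective: alternative).


-- ===== PORT A =====
-- A consumed as a list: loop over tokens keeping (yielded parts, current part); a comma
-- flushes the current part, otherwise it appends the value ('t if just_words else t[0]';
-- the just_words=True value is the tuple itself, outside the declared List String element
-- type, so Pre_ excludes just_words = true and we transliterate the t[0] branch).
def punctuation_partition (tokens : List (String × String)) (just_words : Bool) : List (List String) :=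
  let s := tokens.foldl
    (fun (acc : List (List String) × List String) t =>
      if t.1 == "," then (acc.1 ++ [acc.2], ([] : List String))
      else (acc.1, acc.2 ++ [t.1]))
    ([], [])
  s.1 ++ [s.2]

-- ===== PORT B =====
-- Source B: comma indices via enumerate, boundaries [-1]+idxs+[len(tokens)], and for each
-- consecutive pair (lo, hi) the slice tokens[lo+1:hi] mapped through the value extractor
-- (t[0]; as above, just_words = true is excluded by Pre_).
def punctuation_partition_alt (tokens : List (String × String)) (just_words : Bool) : List (List String) :=
  let idxs : List Int :=
    (PySem.List.enumerate tokens 0).filterMap (fun p => if p.2.1 == "," then some p.1 else none)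
  let bounds : List Int := -1 :: (idxs ++ [(tokens.length : Int)])
  (bounds.zip bounds.tail).map
    (fun p => (PySem.List.slice tokens (some (p.1 + 1)) (some p.2)).map (·.1))

-- ===== PRECONDITION & SPEC =====
-- Pre_ excludes tokens = [], where A raises IndexError on tokens[0] (B does too), and
-- just_words = true, where A's parts contain (word, tag) tuples — not values of the
-- declared output type List (List String).
def Pre_punctuation_partition (tokens : List (String × String)) (just_words : Bool) : Prop :=
  tokens ≠ [] ∧ just_words = false
instance (tokens : List (String × String)) (just_words : Bool) : Decidable (Pre_punctuation_partition tokens just_words) := by unfold Pre_punctuation_partition; infer_instance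

def pvWitness_punctuation_partition : (List (String × String)) × Bool :=
  ([("a", "N"), (",", ","), ("b", "V")], false)

def Spec_punctuation_partition (tokens : List (String × String)) (just_words : Bool) (out : List (List String)) : Prop := out = punctuation_partition_alt tokens just_words
instance (tokens : List (String × String)) (just_words : Bool) (out : List (List String)) : Decidable (Spec_punctuation_partition tokens just_words out) := by unfold Spec_punctuation_partition; infer_instance

-- ===== CLAIM (what is proved, stated in full; the proofs are below) =====
def Claim_equal_punctuation_partition : Prop := ∀ (tokens : List (String × String)) (just_words : Bool), Dom_punctuation_partition tokens just_words → Pre_punctuation_partition tokens just_words → Spec_punctuation_partition tokens just_words (punctuation_partition tokens just_words)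

-- ===== LEMMAS AND PROOFS =====

-- Reference split: the partition both ports compute.
def pvSplit : List (String × String) → List (List String)
  | [] => [[]]
  | t :: ts => if t.1 == "," then [] :: pvSplit ts else (pvSplit ts).modifyHead (t.1 :: ·)

lemma pvFoldA_eq (tokens : List (String × String)) (parts : List (List String)) (cur : List String) :
    (tokens.foldl
      (fun (acc : List (List String) × List String) t =>
        if t.1 == "," then (acc.1 ++ [acc.2], ([] : List String))
        else (acc.1, acc.2 ++ [t.1]))
      (parts, cur)).1
    ++ [(tokens.foldl
      (fun (acc : List (List String) × List String) t =>
        if t.1 == "," then (acc.1 ++ [acc.2], ([] : List String))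
        else (acc.1, acc.2 ++ [t.1]))
      (parts, cur)).2]
    = parts ++ (pvSplit tokens).modifyHead (cur ++ ·) := by
  induction tokens generalizing parts cur with
  | nil => simp [pvSplit]
  | cons t ts ih =>
    by_cases h : t.1 == ","
    · simp only [List.foldl_cons, h, if_pos, pvSplit]
      rw [ih]
      cases pvSplit ts <;> simp
    · simp only [List.foldl_cons, h, if_neg, pvSplit, Bool.false_eq_true, not_false_iff]
      rw [ih]
      cases hs : pvSplit ts with
      | nil => simp
      | cons x xs => simp [List.modifyHead]

lemma pvModifyHead_id (l : List (List String)) : l.modifyHead (fun x => x) = l := by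
  cases l <;> simp

lemma pvA_eq_split (tokens : List (String × String)) (just_words : Bool) :
    punctuation_partition tokens just_words = pvSplit tokens := by
  have h := pvFoldA_eq tokens [] []
  simpa [punctuation_partition, pvModifyHead_id] using h

lemma pvEnumerate_shift (tokens : List (String × String)) (s : Int) :
    PySem.List.enumerate tokens (s + 1)
      = (PySem.List.enumerate tokens s).map (fun p => (p.1 + 1, p.2)) := by
  induction tokens generalizing s with
  | nil => simp [PySem.List.enumerate_nil]
  | cons t ts ih =>
    rw [PySem.List.enumerate_cons, PySem.List.enumerate_cons, List.map_cons, ← ih]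

-- Shifting both bounds of a nonnegative slice window by one and prepending a token
-- leaves the slice unchanged.
lemma pvSlice_shift (t : String × String) (ts : List (String × String)) (a b : Int)
    (ha : 0 ≤ a + 1) (hb : 0 ≤ b) :
    PySem.List.slice (t :: ts) (some (a + 1 + 1)) (some (b + 1))
      = PySem.List.slice ts (some (a + 1)) (some b) := by
  rw [PySem.List.slice_toNat _ (by omega) (by omega), PySem.List.slice_toNat _ ha hb]
  have h1 : (a + 1 + 1).toNat = (a + 1).toNat + 1 := by omega
  have h2 : (b + 1).toNat = b.toNat + 1 := by omega
  simp [h1, h2]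

lemma pvB_eq_split (tokens : List (String × String)) (just_words : Bool) :
    punctuation_partition_alt tokens just_words = pvSplit tokens := by
  induction tokens with
  | nil =>
    simp [punctuation_partition_alt, pvSplit, PySem.List.enumerate_nil,
      PySem.List.slice_toNat ([] : List (String × String)) (a := 0) (b := 0) le_rfl le_rfl]
  | cons t ts ih =>
    simp only [punctuation_partition_alt, PySem.List.enumerate_cons, zero_add] at ih ⊢
    have hsh := pvEnumerate_shift ts 0
    norm_num at hsh
    rw [hsh]
    set idxs : List Int :=
      (PySem.List.enumerate ts 0).filterMap (fun p => if p.2.1 == "," then some p.1 else none)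
      with hidxs
    simp only [List.tail_cons] at ih
    have hmem : ∀ i ∈ idxs, 0 ≤ i := by
      intro i hi
      rw [hidxs] at hi
      obtain ⟨p, hp, hpi⟩ := List.mem_filterMap.mp hi
      obtain ⟨k, hk, rfl⟩ := (PySem.List.mem_enumerate_iff _ _ _).mp hp
      by_cases hc : (ts[k].1 == ",")
      · simp [hc] at hpi
        omega
      · simp [hc] at hpi
    have hfm : ((PySem.List.enumerate ts 0).map (fun p => (p.1 + 1, p.2))).filterMap
        (fun p => if p.2.1 == "," then some p.1 else none) = idxs.map (· + 1) := by
      rw [List.filterMap_map, hidxs, List.map_filterMap]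
      congr 1; funext p
      by_cases hc : p.2.1 == ","
      · have hq : p.2.1 = "," := eq_of_beq hc
        simp [Function.comp, hq]
      · have hq : ¬ p.2.1 = "," := fun h => hc (by simp [h])
        simp [Function.comp, hq]
    have hF : List.filterMap (fun p => if (p.2.1 == ",") = true then some p.1 else none)
        ((0, t) :: (PySem.List.enumerate ts 0).map (fun p => (p.1 + 1, p.2)))
        = (if t.1 == "," then [(0 : Int)] else []) ++ idxs.map (· + 1) := by
      rw [List.filterMap_cons, hfm]
      by_cases hc : t.1 == "," <;> simp [hc]
    have hlen : ((t :: ts).length : Int) = (ts.length : Int) + 1 := by simp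
    have hL : idxs.map (· + 1) ++ [((ts.length : Int) + 1)]
        = (idxs ++ [(ts.length : Int)]).map (· + 1) := by simp
    have hnnL : ∀ i ∈ idxs ++ [(ts.length : Int)], 0 ≤ i := by
      intro i hi
      rcases List.mem_append.mp hi with h | h
      · exact hmem i h
      · simp at h; omega
    -- generic fact: shifting every boundary by one and prepending t yields the same parts
    have hpairs : ∀ (L : List Int), (∀ i ∈ L, 0 ≤ i) →
        ∀ (a : Int), 0 ≤ a →
        ((a :: L.map (· + 1)).zip (L.map (· + 1))).map
            (fun p => (PySem.List.slice (t :: ts) (some (p.1 + 1)) (some p.2)).map (·.1))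
          = (((a - 1) :: L).zip L).map
            (fun p => (PySem.List.slice ts (some (p.1 + 1)) (some p.2)).map (·.1)) := by
      intro L
      induction L with
      | nil => intro _ a _; simp
      | cons x xs ihL =>
        intro hnn a ha
        have hx : 0 ≤ x := hnn x (by simp)
        simp only [List.map_cons, List.zip_cons_cons, List.map_cons]
        have h1 : PySem.List.slice (t :: ts) (some (a + 1)) (some (x + 1))
            = PySem.List.slice ts (some (a - 1 + 1)) (some x) := by
          have := pvSlice_shift t ts (a - 1) x (by omega) hx
          simpa using this
        rw [h1]
        congr 1
        have := ihL (fun i hi => hnn i (by simp [hi])) (x + 1) (by omega)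
        simpa using this
    rw [hF, hlen]
    by_cases hc : t.1 == ","
    · -- comma at the head: first part is empty, the rest shifts
      simp only [hc, if_pos, List.cons_append, List.nil_append,
        List.tail_cons, List.zip_cons_cons, List.map_cons]
      have hfirst : PySem.List.slice (t :: ts) (some (-1 + 1)) (some 0) = [] := by
        rw [PySem.List.slice_toNat _ (by omega) le_rfl]; simp
      rw [hfirst, hL, hpairs (idxs ++ [(ts.length : Int)]) hnnL 0 le_rfl,
        show (0 : Int) - 1 = -1 from by norm_num, ih]
      simp [pvSplit, hc]
    · -- non-comma head: it is prepended to the first part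
      simp only [hc, if_neg, Bool.false_eq_true, not_false_iff, List.nil_append]
      rw [hL]
      rcases hE : idxs ++ [(ts.length : Int)] with _ | ⟨h0, L'⟩
      · simp at hE
      · have hnnL' : ∀ i ∈ h0 :: L', 0 ≤ i := hE ▸ hnnL
        have h0nn : 0 ≤ h0 := hnnL' h0 (by simp)
        simp only [List.map_cons, List.tail_cons, List.zip_cons_cons, List.map_cons]
        have hfirst : PySem.List.slice (t :: ts) (some (-1 + 1)) (some (h0 + 1))
            = t :: PySem.List.slice ts (some (-1 + 1)) (some h0) := by
          rw [PySem.List.slice_toNat _ (by omega) (by omega),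
              PySem.List.slice_toNat _ (by omega) h0nn]
          have h2 : (h0 + 1).toNat = h0.toNat + 1 := by omega
          simp [h2]
        rw [hfirst]
        have htail : (((h0 + 1) :: L'.map (· + 1)).zip (L'.map (· + 1))).map
              (fun p => (PySem.List.slice (t :: ts) (some (p.1 + 1)) (some p.2)).map (·.1))
            = ((h0 :: L').zip L').map
              (fun p => (PySem.List.slice ts (some (p.1 + 1)) (some p.2)).map (·.1)) := by
          have := hpairs L' (fun i hi => hnnL' i (by simp [hi])) (h0 + 1) (by omega)
          simpa using this
        rw [htail]
        have hBts : (((-1 : Int) :: (h0 :: L')).zip (h0 :: L')).map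
              (fun p => (PySem.List.slice ts (some (p.1 + 1)) (some p.2)).map (·.1))
            = pvSplit ts := by
          rw [← hE]; exact ih
        simp only [List.zip_cons_cons, List.map_cons] at hBts
        rw [pvSplit]
        simp only [hc, Bool.false_eq_true, if_false]
        rw [← hBts]
        simp [List.modifyHead]

lemma pvA_eq_B (tokens : List (String × String)) (just_words : Bool) :
    punctuation_partition tokens just_words = punctuation_partition_alt tokens just_words := by
  rw [pvA_eq_split, pvB_eq_split]

-- ===== VERDICT (by name: the statement is the Claim_ definition above) =====
theorem punctuation_partition_spec : Claim_equal_punctuation_partition := by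
  intro tokens just_words _ _
  unfold Spec_punctuation_partition
  exact pvA_eq_B tokens just_words
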